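-- pv_equiv track=rewrite | github.com/b2sdev/CodeSignal-Solutions | Intro/level-12/longestWord.py | solution
-- ===== SOURCE A (Python) =====
-- def solution(text):
--     longest = ""
--     left = 0
--     while left < len(text):
--         while left < len(text) and not text[left].isalpha():
--             left += 1
--         right = left
--         while right < len(text) and text[right].isalpha():
--             right += 1
--         if right - left > len(longest):
--             longest = text[left:right]
--         left += 1
--     return longest
-- ===== SOURCE B (Python) =====
-- def solution(text):
--     # One linear pass: grow the current alphabetic run, close it on a non-letter.
--     best = ""
--     cur = ""
--     for ch in text:
--         if ch.isalpha():
--             cur += ch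
--         else:
--             if len(cur) > len(best):
--                 best = cur
--             cur = ""
--     return cur if len(cur) > len(best) else best
-- ===== Notes on version B (the rewrite author's own statement) =====
-- stated objective: faster
-- what changed: replaced the nested index scans (which restart a word scan at every position, quadratic in word length) by a single left-to-right pass that accumulates the current alphabetic run and closes it at each non-letter
import Mathlib
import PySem

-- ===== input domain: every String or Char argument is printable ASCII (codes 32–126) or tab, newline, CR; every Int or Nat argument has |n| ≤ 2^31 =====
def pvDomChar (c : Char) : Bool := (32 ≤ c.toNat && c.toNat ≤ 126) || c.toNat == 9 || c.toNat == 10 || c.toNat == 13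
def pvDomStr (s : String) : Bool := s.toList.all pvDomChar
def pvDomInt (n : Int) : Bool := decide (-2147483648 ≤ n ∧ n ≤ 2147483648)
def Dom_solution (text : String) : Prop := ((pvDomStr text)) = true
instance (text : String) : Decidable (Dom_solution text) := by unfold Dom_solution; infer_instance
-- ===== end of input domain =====

-- B replaces A's nested index scans by one linear left-to-right pass over the characters
-- that accumulates the current alphabetic run; same return value on every input.

-- ===== PORT A =====
-- 'while left < len(text) and not text[left].isalpha(): left += 1'
def solSkip (cs : List Char) (l : Nat) : Nat :=
  if h : l < cs.length ∧ ¬ PySem.Chars.isalpha (cs.getD l ' ') then solSkip cs (l + 1) else l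
termination_by cs.length - l
decreasing_by omega

-- 'while right < len(text) and text[right].isalpha(): right += 1'
def solScan (cs : List Char) (r : Nat) : Nat :=
  if h : r < cs.length ∧ PySem.Chars.isalpha (cs.getD r ' ') then solScan cs (r + 1) else r
termination_by cs.length - r
decreasing_by omega

-- the outer 'while left < len(text)' loop of A
def solLoop (cs : List Char) (longest : List Char) (left : Nat) : List Char :=
  if h : left < cs.length then
    let l := solSkip cs left
    let r := solScan cs l
    let longest' := if r - l > longest.length then PySem.List.slice cs (some (l : Int)) (some (r : Int)) else longest
    solLoop cs longest' (left + 1)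
  else longest
termination_by cs.length - left
decreasing_by omega

def solution (text : String) : String := String.ofList (solLoop text.toList [] 0)

-- ===== PORT B =====
-- one pass: grow the current alphabetic run 'cur', close it on a non-letter
def altLoop : List Char → List Char → List Char → List Char
  | [], best, cur => if cur.length > best.length then cur else best
  | c :: t, best, cur =>
    if PySem.Chars.isalpha c then altLoop t best (cur ++ [c])
    else altLoop t (if cur.length > best.length then cur else best) []

def solution_alt (text : String) : String := String.ofList (altLoop text.toList [] [])

-- ===== PRECONDITION & SPEC =====
def Spec_solution (text : String) (out : String) : Prop := out = solution_alt text
instance (text : String) (out : String) : Decidable (Spec_solution text out) := by unfold Spec_solution; infer_instance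

-- ===== CLAIM (what is proved, stated in full; the proofs are below) =====
def Claim_equal_solution : Prop := ∀ (text : String), Dom_solution text → Spec_solution text (solution text)

-- ===== LEMMAS AND PROOFS =====

-- common vocabulary for the proof: maximal alphabetic runs and the 'first longest' selector
def maxSel (b r : List Char) : List Char := if r.length > b.length then r else b

def runsOf : List Char → List (List Char)
  | [] => []
  | c :: t =>
    if PySem.Chars.isalpha c then
      (c :: t.takeWhile PySem.Chars.isalpha) :: runsOf (t.dropWhile PySem.Chars.isalpha)
    else runsOf t
termination_by cs => cs.length
decreasing_by
  · have := List.length_dropWhile_le (p := PySem.Chars.isalpha) (l := t); simp; omega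
  · simp

def foldSel (b : List Char) (rs : List (List Char)) : List Char := rs.foldl maxSel b

theorem maxSel_absorb {b r : List Char} (h : r.length ≤ b.length) : maxSel b r = b := by
  simp [maxSel]; omega

theorem solSkip_eq (cs : List Char) (l : Nat) :
    solSkip cs l = l + ((cs.drop l).takeWhile (fun c => ¬ PySem.Chars.isalpha c)).length := by
  have key : ∀ k l, cs.length - l ≤ k →
      solSkip cs l = l + ((cs.drop l).takeWhile (fun c => ¬ PySem.Chars.isalpha c)).length := by
    intro k
    induction k with
    | zero =>
      intro l hk
      rw [solSkip, dif_neg (by omega), List.drop_eq_nil_of_le (by omega)]; simp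
    | succ k ih =>
      intro l hk
      by_cases hl : l < cs.length
      · have hd := List.drop_eq_getElem_cons hl
        by_cases ha : PySem.Chars.isalpha cs[l]
        · rw [solSkip, dif_neg (by rw [List.getD_eq_getElem cs ' ' hl]; simp [ha]), hd,
              List.takeWhile_cons]
          simp [ha]
        · rw [solSkip, dif_pos ⟨hl, by rw [List.getD_eq_getElem cs ' ' hl]; simp [ha]⟩,
              ih (l + 1) (by omega), hd, List.takeWhile_cons]
          simp [ha]; omega
      · rw [solSkip, dif_neg (by omega), List.drop_eq_nil_of_le (by omega)]; simp
  exact key (cs.length - l) l le_rfl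

theorem solScan_eq (cs : List Char) (l : Nat) :
    solScan cs l = l + ((cs.drop l).takeWhile PySem.Chars.isalpha).length := by
  have key : ∀ k l, cs.length - l ≤ k →
      solScan cs l = l + ((cs.drop l).takeWhile PySem.Chars.isalpha).length := by
    intro k
    induction k with
    | zero =>
      intro l hk
      rw [solScan, dif_neg (by omega), List.drop_eq_nil_of_le (by omega)]; simp
    | succ k ih =>
      intro l hk
      by_cases hl : l < cs.length
      · have hd := List.drop_eq_getElem_cons hl
        by_cases ha : PySem.Chars.isalpha cs[l]
        · rw [solScan, dif_pos ⟨hl, by rw [List.getD_eq_getElem cs ' ' hl]; exact ha⟩,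
              ih (l + 1) (by omega), hd, List.takeWhile_cons]
          simp [ha]; omega
        · rw [solScan, dif_neg (by rw [List.getD_eq_getElem cs ' ' hl]; simp [ha]), hd,
              List.takeWhile_cons]
          simp [ha]
      · rw [solScan, dif_neg (by omega), List.drop_eq_nil_of_le (by omega)]; simp
  exact key (cs.length - l) l le_rfl

theorem take_len_takeWhile (p : Char → Bool) (s : List Char) :
    s.take (s.takeWhile p).length = s.takeWhile p := by
  induction s with
  | nil => rfl
  | cons c t ih => by_cases hc : p c <;> simp [hc, ih]

theorem drop_len_takeWhile (p : Char → Bool) (s : List Char) :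
    s.drop (s.takeWhile p).length = s.dropWhile p := by
  induction s with
  | nil => rfl
  | cons c t ih => by_cases hc : p c <;> simp [hc, ih]

-- A's loop seen on the suffix list: at each step it records the first run of the suffix
def loopA' : List Char → List Char → List Char
  | [], b => b
  | c :: t, b =>
    loopA' t (maxSel b (((c :: t).dropWhile (fun x => ¬ PySem.Chars.isalpha x)).takeWhile PySem.Chars.isalpha))

theorem len_le_maxSel (b r : List Char) : r.length ≤ (maxSel b r).length := by
  unfold maxSel; split <;> omega

theorem foldSel_cons (b r : List Char) (rs : List (List Char)) :
    foldSel b (r :: rs) = foldSel (maxSel b r) rs := rfl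

theorem takeWhile_all_append (p : Char → Bool) (u : List Char) (c : Char) (v : List Char)
    (hu : ∀ x ∈ u, p x = true) (hc : p c = false) : (u ++ c :: v).takeWhile p = u := by
  induction u with
  | nil => simp [hc]
  | cons d u' ih =>
    simp only [List.cons_append, List.takeWhile_cons, hu d (by simp), if_true]
    rw [ih (fun x hx => hu x (by simp [hx]))]

theorem dropWhile_all_append (p : Char → Bool) (u : List Char) (c : Char) (v : List Char)
    (hu : ∀ x ∈ u, p x = true) (hc : p c = false) : (u ++ c :: v).dropWhile p = c :: v := by
  induction u with
  | nil => simp [hc]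
  | cons d u' ih =>
    simp only [List.cons_append, List.dropWhile_cons, hu d (by simp), if_true]
    exact ih (fun x hx => hu x (by simp [hx]))

theorem runs_alpha_all (cur : List Char) (hne : cur ≠ [])
    (h : ∀ c ∈ cur, PySem.Chars.isalpha c) : runsOf cur = [cur] := by
  cases cur with
  | nil => exact absurd rfl hne
  | cons d cur' =>
    rw [runsOf, if_pos (h d (by simp)),
        List.takeWhile_eq_self_iff.mpr (fun x hx => h x (by simp [hx])),
        List.dropWhile_eq_nil_iff.mpr (fun x hx => h x (by simp [hx])), runsOf]

theorem runs_alpha_append (cur : List Char) (c : Char) (t : List Char)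
    (h : ∀ x ∈ cur, PySem.Chars.isalpha x) (hc : ¬ PySem.Chars.isalpha c) :
    runsOf (cur ++ c :: t) = (if cur = [] then [] else [cur]) ++ runsOf t := by
  cases cur with
  | nil =>
    rw [show ([] : List Char) ++ c :: t = c :: t from rfl, runsOf, if_neg hc]
    simp
  | cons d cur' =>
    rw [List.cons_append, runsOf, if_pos (h d (by simp)),
        takeWhile_all_append _ _ _ _ (fun x hx => h x (by simp [hx])) (by simpa using hc),
        dropWhile_all_append _ _ _ _ (fun x hx => h x (by simp [hx])) (by simpa using hc),
        runsOf, if_neg hc]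
    simp

theorem foldSel_dropAlpha (t : List Char) (b : List Char)
    (h : (t.takeWhile PySem.Chars.isalpha).length ≤ b.length) :
    foldSel b (runsOf t) = foldSel b (runsOf (t.dropWhile PySem.Chars.isalpha)) := by
  cases t with
  | nil => rfl
  | cons c t' =>
    by_cases hc : PySem.Chars.isalpha c
    · rw [runsOf, if_pos hc, List.dropWhile_cons_of_pos hc, foldSel_cons, maxSel_absorb]
      rw [List.takeWhile_cons_of_pos hc] at h
      simpa using h
    · rw [List.dropWhile_cons_of_neg hc]

theorem foldSel_firstRun (t : List Char) (b : List Char) :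
    foldSel (maxSel b ((t.dropWhile (fun x => ¬ PySem.Chars.isalpha x)).takeWhile PySem.Chars.isalpha))
      (runsOf t) = foldSel b (runsOf t) := by
  induction t generalizing b with
  | nil => simp [runsOf, foldSel, maxSel]
  | cons c t' ih =>
    by_cases hc : PySem.Chars.isalpha c
    · rw [List.dropWhile_cons_of_neg (by simpa using hc), List.takeWhile_cons_of_pos hc,
          runsOf, if_pos hc, foldSel_cons, foldSel_cons,
          maxSel_absorb (len_le_maxSel b (c :: List.takeWhile PySem.Chars.isalpha t'))]
    · rw [List.dropWhile_cons_of_pos (by simpa using hc), runsOf, if_neg hc]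
      exact ih b

theorem loopA'_eq_foldSel (s : List Char) (b : List Char) :
    loopA' s b = foldSel b (runsOf s) := by
  induction s generalizing b with
  | nil => simp [loopA', runsOf, foldSel]
  | cons c t ih =>
    rw [loopA', ih]
    by_cases hc : PySem.Chars.isalpha c
    · rw [List.dropWhile_cons_of_neg (by simpa using hc), List.takeWhile_cons_of_pos hc,
          runsOf, if_pos hc, foldSel_cons]
      refine foldSel_dropAlpha t _ ?_
      have := len_le_maxSel b (c :: List.takeWhile PySem.Chars.isalpha t)
      simp at this; omega
    · rw [List.dropWhile_cons_of_pos (by simpa using hc), runsOf, if_neg hc]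
      exact foldSel_firstRun t b

theorem solLoop_eq_loopA' (cs : List Char) (longest : List Char) (left : Nat) :
    solLoop cs longest left = loopA' (cs.drop left) longest := by
  have key : ∀ k left longest, cs.length - left ≤ k →
      solLoop cs longest left = loopA' (cs.drop left) longest := by
    intro k
    induction k with
    | zero =>
      intro left longest hk
      rw [solLoop, dif_neg (by omega), List.drop_eq_nil_of_le (by omega)]; rfl
    | succ k ih =>
      intro left longest hk
      by_cases hl : left < cs.length
      · rw [solLoop, dif_pos hl]
        dsimp only
        have hsl := solSkip_eq cs left
        have hdl : cs.drop (solSkip cs left)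
            = (cs.drop left).dropWhile (fun c => ¬ PySem.Chars.isalpha c) := by
          rw [hsl, ← drop_len_takeWhile (fun c => ¬ PySem.Chars.isalpha c) (cs.drop left),
              List.drop_drop]
        have hscan : solScan cs (solSkip cs left) = solSkip cs left +
            (((cs.drop left).dropWhile (fun c => ¬ PySem.Chars.isalpha c)).takeWhile
              PySem.Chars.isalpha).length := by
          rw [solScan_eq, hdl]
        have hslice : PySem.List.slice cs (some (solSkip cs left : Int))
              (some (solScan cs (solSkip cs left) : Int))
            = ((cs.drop left).dropWhile (fun c => ¬ PySem.Chars.isalpha c)).takeWhile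
              PySem.Chars.isalpha := by
          rw [hscan]
          push_cast
          rw [PySem.List.slice_natCast_add, hdl, take_len_takeWhile]
        obtain ⟨c, t, hct⟩ : ∃ c t, cs.drop left = c :: t := by
          cases hcd : cs.drop left with
          | nil => have := List.drop_eq_nil_iff.mp hcd; omega
          | cons c t => exact ⟨c, t, rfl⟩
        have ht : cs.drop (left + 1) = t := by
          rw [← List.tail_drop, hct]; rfl
        rw [hslice, hscan, ih (left + 1) _ (by omega), ht, hct, loopA']
        rw [← hct]
        have harith : solSkip cs left +
            (((cs.drop left).dropWhile (fun c => ¬ PySem.Chars.isalpha c)).takeWhile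
              PySem.Chars.isalpha).length - solSkip cs left
            = (((cs.drop left).dropWhile (fun c => ¬ PySem.Chars.isalpha c)).takeWhile
              PySem.Chars.isalpha).length := by omega
        rw [harith]
        rfl
      · rw [solLoop, dif_neg (by omega), List.drop_eq_nil_of_le (by omega)]; rfl
  exact key (cs.length - left) left longest le_rfl

theorem altLoop_eq_foldSel (cs : List Char) (best cur : List Char)
    (h : ∀ c ∈ cur, PySem.Chars.isalpha c) :
    altLoop cs best cur = foldSel best (runsOf (cur ++ cs)) := by
  induction cs generalizing best cur with
  | nil =>
    rw [List.append_nil, altLoop]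
    by_cases hcur : cur = []
    · subst hcur
      simp [runsOf, foldSel]
    · rw [runs_alpha_all cur hcur h]
      rfl
  | cons c t ih =>
    by_cases hc : PySem.Chars.isalpha c
    · rw [altLoop, if_pos hc]
      rw [ih best (cur ++ [c]) (by intro x hx; rcases List.mem_append.mp hx with h' | h'
                                   · exact h x h'
                                   · simp at h'; subst h'; exact hc),
          List.append_assoc]
      rfl
    · rw [altLoop, if_neg hc]
      rw [ih _ [] (by simp), List.nil_append, runs_alpha_append cur c t h hc]
      by_cases hcur : cur = []
      · subst hcur; simp
      · rw [if_neg hcur]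
        show foldSel (maxSel best cur) (runsOf t) = foldSel best (cur :: runsOf t)
        rw [foldSel_cons]

-- ===== VERDICT (by name: the statement is the Claim_ definition above) =====
theorem solution_spec : Claim_equal_solution := by
  intro text _
  unfold Spec_solution solution solution_alt
  rw [solLoop_eq_loopA', List.drop_zero, loopA'_eq_foldSel,
      altLoop_eq_foldSel _ _ _ (by simp), List.nil_append]
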